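-- pv_equiv track=rewrite | github.com/vosslab/biology-problems | inheritance-problems/genetrees/treelib/profiles.py | string_match2
-- ===== SOURCE A (Python) =====
-- def string_match2(str1: str, str2: str) -> int:
-- 	"""
-- 	Calculates a similarity score between two strings.
--
-- 	Matching characters contribute to the score, with higher rewards for uninterrupted matches.
-- 	The score decreases incrementally after encountering a mismatch.
-- 	"""
-- 	minlen = min(len(str1), len(str2))  # Only compare up to the shorter string's length
-- 	count = 0
-- 	count_step = 10
-- 	for i in range(minlen):
-- 		if str1[i] != str2[i]:
-- 			count_step = 1  # Reduce reward after the first mismatch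
-- 		count += count_step
-- 	return count
-- ===== SOURCE B (Python) =====
-- def string_match2(str1: str, str2: str) -> int:
--     minlen = min(len(str1), len(str2))
--     p = 0
--     while p < minlen and str1[p] == str2[p]:
--         p += 1
--     return minlen + 9 * p
-- ===== Notes on version B (the rewrite author's own statement) =====
-- stated objective: faster
-- what changed: Replaces the running count/count_step accumulator loop over all minlen positions by an early-exit scan that stops at the first mismatch to find the common-prefix length p, returning the closed form minlen + 9*p.
import Mathlib
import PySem

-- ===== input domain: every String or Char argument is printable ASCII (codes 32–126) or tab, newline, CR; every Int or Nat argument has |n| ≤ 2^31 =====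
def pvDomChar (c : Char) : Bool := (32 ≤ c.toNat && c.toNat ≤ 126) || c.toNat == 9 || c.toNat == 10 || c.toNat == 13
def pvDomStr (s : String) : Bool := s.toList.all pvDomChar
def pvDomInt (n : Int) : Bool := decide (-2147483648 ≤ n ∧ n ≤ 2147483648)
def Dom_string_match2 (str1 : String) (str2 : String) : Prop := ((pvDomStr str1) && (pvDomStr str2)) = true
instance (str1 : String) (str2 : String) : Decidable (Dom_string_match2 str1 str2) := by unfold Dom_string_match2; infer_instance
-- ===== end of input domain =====

-- B computes the common-prefix length once and returns the closed form minlen + 9*p,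
-- replacing A's running count/count_step accumulator loop (objective: simpler).

-- ===== PORT A =====
def string_match2 (str1 : String) (str2 : String) : Int :=
  let minlen : Int := min (PySem.Str.len str1) (PySem.Str.len str2)
  -- count = 0, count_step = 10; for i in range(minlen): if str1[i] != str2[i]: count_step = 1; count += count_step
  let st := (PySem.List.pyRange 0 minlen 1).foldl
    (fun (st : Int × Int) i =>
      let count_step := if PySem.Str.pyGet? str1 i ≠ PySem.Str.pyGet? str2 i then 1 else st.2
      (st.1 + count_step, count_step)) (0, 10)
  st.1

-- ===== PORT B =====
-- the while loop 'p = 0; while p < minlen and str1[p] == str2[p]: p += 1' as structural recursion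
def pvPrefixLen : List Char → List Char → Int
  | a :: as, b :: bs => if a = b then 1 + pvPrefixLen as bs else 0
  | _, _ => 0

def string_match2_alt (str1 : String) (str2 : String) : Int :=
  let minlen : Int := min (PySem.Str.len str1) (PySem.Str.len str2)
  minlen + 9 * pvPrefixLen str1.toList str2.toList

-- ===== PRECONDITION & SPEC =====
def Spec_string_match2 (str1 : String) (str2 : String) (out : Int) : Prop := out = string_match2_alt str1 str2
instance (str1 : String) (str2 : String) (out : Int) : Decidable (Spec_string_match2 str1 str2 out) := by unfold Spec_string_match2; infer_instance

-- ===== CLAIM (what is proved, stated in full; the proofs are below) =====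
def Claim_equal_string_match2 : Prop := ∀ (str1 : String) (str2 : String), Dom_string_match2 str1 str2 → Spec_string_match2 str1 str2 (string_match2 str1 str2)

-- ===== LEMMAS AND PROOFS =====

-- A's loop body, viewed as a fold over the zipped character pairs
def pvStep (st : Int × Int) (p : Char × Char) : Int × Int :=
  let count_step := if p.1 ≠ p.2 then 1 else st.2
  (st.1 + count_step, count_step)

-- once count_step has dropped to 1 it stays 1 and each remaining pair adds 1
lemma pv_after_mismatch (zs : List (Char × Char)) (c : Int) :
    (zs.foldl pvStep (c, 1)).1 = c + zs.length := by
  induction zs generalizing c with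
  | nil => simp
  | cons p zs ih =>
    simp only [List.foldl_cons, pvStep, ite_self]
    rw [ih]
    simp only [List.length_cons]
    push_cast
    omega

lemma pv_zipfold (l1 l2 : List Char) (c : Int) :
    ((l1.zip l2).foldl pvStep (c, 10)).1
      = c + min (l1.length : Int) (l2.length : Int) + 9 * pvPrefixLen l1 l2 := by
  induction l1 generalizing l2 c with
  | nil => simp [pvPrefixLen]
  | cons a as ih =>
    cases l2 with
    | nil =>
      simp only [List.zip_nil_right, List.foldl_nil, pvPrefixLen, List.length_nil,
        Nat.cast_zero, mul_zero, add_zero]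
      omega
    | cons b bs =>
      by_cases hab : a = b
      · have h1 : pvStep (c, 10) (a, b) = (c + 10, 10) := by
          simp [pvStep, hab]
        simp only [List.zip_cons_cons, List.foldl_cons, h1, pvPrefixLen, if_pos hab]
        rw [ih]
        simp only [List.length_cons]
        push_cast
        omega
      · have h1 : pvStep (c, 10) (a, b) = (c + 1, 1) := by
          simp [pvStep, hab]
        simp only [List.zip_cons_cons, List.foldl_cons, h1, pvPrefixLen, if_neg hab]
        rw [pv_after_mismatch]
        have : (as.zip bs).length = min as.length bs.length := List.length_zip ..
        rw [this]
        simp only [List.length_cons]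
        push_cast
        omega

-- A's indexed loop over range(minlen) is the fold of pvStep over the zipped lists
lemma pv_key (l1 l2 : List Char) :
    ((PySem.List.pyRange 0 (min (l1.length : Int) (l2.length : Int)) 1).foldl
        (fun (st : Int × Int) i =>
          let count_step := if PySem.List.pyGet? l1 i ≠ PySem.List.pyGet? l2 i then 1 else st.2
          (st.1 + count_step, count_step)) (0, 10)).1
      = min (l1.length : Int) (l2.length : Int) + 9 * pvPrefixLen l1 l2 := by
  have hlen : min (l1.length : Int) (l2.length : Int) = ((l1.zip l2).length : Int) := by
    rw [List.length_zip]; push_cast; omega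
  have hcongr :
      (PySem.List.pyRange 0 (min (l1.length : Int) (l2.length : Int)) 1).foldl
        (fun (st : Int × Int) i =>
          let count_step := if PySem.List.pyGet? l1 i ≠ PySem.List.pyGet? l2 i then 1 else st.2
          (st.1 + count_step, count_step)) (0, 10)
      = (PySem.List.pyRange 0 (min (l1.length : Int) (l2.length : Int)) 1).foldl
        (fun (st : Int × Int) i =>
          pvStep st (PySem.List.pyGetD (l1.zip l2) i ('a', 'a'))) (0, 10) := by
    apply PySem.List.foldl_congr_mem
    intro st i hi
    rw [PySem.List.mem_pyRange_one] at hi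
    obtain ⟨h0, hlt⟩ := hi
    have hi1 : i.toNat < l1.length := by omega
    have hi2 : i.toNat < l2.length := by omega
    have hiz : i.toNat < (l1.zip l2).length := by rw [List.length_zip]; omega
    have hia : i < (l1.length : Int) := lt_of_lt_of_le hlt (min_le_left _ _)
    have hib : i < (l2.length : Int) := lt_of_lt_of_le hlt (min_le_right _ _)
    have e1 : PySem.List.pyGet? l1 i = some l1[i.toNat] :=
      PySem.List.pyGet?_eq_some_getElem _ h0 hia
    have e2 : PySem.List.pyGet? l2 i = some l2[i.toNat] :=
      PySem.List.pyGet?_eq_some_getElem _ h0 hib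
    have hd : PySem.List.pyGetD (l1.zip l2) i ('a', 'a') = (l1.zip l2)[i.toNat] := by
      rw [PySem.List.pyGetD_of_nonneg _ _ h0, List.getD_eq_getElem _ _ hiz]
    simp [e1, e2, hd, pvStep, List.getElem_zip]
  rw [hcongr, hlen,
    PySem.List.foldl_pyRange_zero_pyGetD' (l1.zip l2) ('a', 'a') pvStep (0, 10)]
  rw [← hlen]
  simpa using pv_zipfold l1 l2 0

-- ===== VERDICT (by name: the statement is the Claim_ definition above) =====
theorem string_match2_spec : Claim_equal_string_match2 := by
  intro str1 str2 _
  unfold Spec_string_match2 string_match2 string_match2_alt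
  simp only [PySem.Str.len_eq, PySem.Str.pyGet?_eq, PySem.Chars.pyGet?_eq_listPyGet?]
  exact pv_key str1.toList str2.toList
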